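-- pv_equiv track=rewrite | github.com/kevinliao2003/CodePath-TIP102-Spr2025 | Unit1Session2.py | make_divisible_by_3
-- ===== SOURCE A (Python) =====
-- def make_divisible_by_3(nums):
--     count = 0
--     for num in nums:
--         if num % 3 != 0:
--             left_num = num - 1
--             while left_num % 3 != 0:
--                 left_num -= 1
--
--             right_num = num + 1
--             while right_num % 3 != 0:
--                 right_num += 1
--
--             left_diff = abs(left_num - num)
--             right_diff = abs(right_num - num)
--             count += min(left_diff, right_diff)
--
--     return count
-- ===== SOURCE B (Python) =====
-- def make_divisible_by_3(nums):
--     # For integers, the nearest multiple of 3 is always exactly 1 away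
--     # whenever num % 3 != 0 (num % 3 is 1 or 2, min(r, 3-r) = 1), so the
--     # answer is just the count of elements not divisible by 3.
--     return sum(1 for num in nums if num % 3 != 0)
-- ===== Notes on version B (the rewrite author's own statement) =====
-- stated objective: faster
-- what changed: Replaced the two inner while-loop searches for the nearest multiple of 3 (and the min of the two distances, which is always 1 for integers) by a single count of elements not divisible by 3.
import Mathlib
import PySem

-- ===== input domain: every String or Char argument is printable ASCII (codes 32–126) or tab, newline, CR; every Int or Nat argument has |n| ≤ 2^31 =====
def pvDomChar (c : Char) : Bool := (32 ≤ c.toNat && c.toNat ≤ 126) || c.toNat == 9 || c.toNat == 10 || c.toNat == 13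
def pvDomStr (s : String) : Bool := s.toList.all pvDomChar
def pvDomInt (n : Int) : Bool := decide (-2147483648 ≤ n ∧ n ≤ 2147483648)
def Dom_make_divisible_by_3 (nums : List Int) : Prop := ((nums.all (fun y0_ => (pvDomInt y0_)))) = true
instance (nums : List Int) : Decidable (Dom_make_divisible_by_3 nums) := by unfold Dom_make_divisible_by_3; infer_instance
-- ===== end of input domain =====

-- ===== PORT A =====
-- B replaces A's two inner while-loop searches by a plain count (for integers each
-- non-multiple of 3 contributes exactly 1); objective: constant-factor speedup.

-- bridge: Python '%' on this port's divisor 3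
theorem pv_mod3 (x : Int) : PySem.Int.mod x 3 = x % 3 :=
  PySem.Int.mod_eq_emod_of_pos (by omega)

-- termination measure facts for the two while-loop ports (cited by name in decreasing_by)
theorem pvWhileLeft_dec (x : Int) (h : PySem.Int.mod x 3 ≠ 0) :
    (PySem.Int.mod (x - 1) 3).toNat < (PySem.Int.mod x 3).toNat := by
  simp only [pv_mod3] at *
  show ((x - 1) % 3).toNat < (x % 3).toNat
  omega

theorem pvWhileRight_dec (x : Int) (h : PySem.Int.mod x 3 ≠ 0) :
    ((3 - PySem.Int.mod (x + 1) 3) % 3).toNat < ((3 - PySem.Int.mod x 3) % 3).toNat := by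
  simp only [pv_mod3] at *
  show ((3 - (x + 1) % 3) % 3).toNat < ((3 - x % 3) % 3).toNat
  omega

-- 'while left_num % 3 != 0: left_num -= 1'
def pvWhileLeft (x : Int) : Int :=
  if h : PySem.Int.mod x 3 ≠ 0 then pvWhileLeft (x - 1) else x
termination_by (PySem.Int.mod x 3).toNat
decreasing_by exact pvWhileLeft_dec x h

-- 'while right_num % 3 != 0: right_num += 1'
def pvWhileRight (x : Int) : Int :=
  if h : PySem.Int.mod x 3 ≠ 0 then pvWhileRight (x + 1) else x
termination_by ((3 - PySem.Int.mod x 3) % 3).toNat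
decreasing_by exact pvWhileRight_dec x h

def make_divisible_by_3 (nums : List Int) : Int :=
  nums.foldl (fun count num =>
    if PySem.Int.mod num 3 ≠ 0 then
      let left_num := pvWhileLeft (num - 1)
      let right_num := pvWhileRight (num + 1)
      let left_diff := |left_num - num|
      let right_diff := |right_num - num|
      count + min left_diff right_diff
    else count) 0

-- ===== PORT B =====
-- sum(1 for num in nums if num % 3 != 0)
def make_divisible_by_3_alt (nums : List Int) : Int :=
  nums.foldl (fun c num => if PySem.Int.mod num 3 ≠ 0 then c + 1 else c) 0

-- ===== PRECONDITION & SPEC =====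
def Spec_make_divisible_by_3 (nums : List Int) (out : Int) : Prop := out = make_divisible_by_3_alt nums
instance (nums : List Int) (out : Int) : Decidable (Spec_make_divisible_by_3 nums out) := by unfold Spec_make_divisible_by_3; infer_instance

-- ===== CLAIM (what is proved, stated in full; the proofs are below) =====
def Claim_equal_make_divisible_by_3 : Prop := ∀ (nums : List Int), Dom_make_divisible_by_3 nums → Spec_make_divisible_by_3 nums (make_divisible_by_3 nums)

-- ===== LEMMAS AND PROOFS =====

theorem pvWhileLeft_eq (x : Int) : pvWhileLeft x = x - x % 3 := by
  induction x using pvWhileLeft.induct with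
  | case1 x h ih =>
    rw [pvWhileLeft, dif_pos h, ih]
    rw [pv_mod3] at h
    omega
  | case2 x h =>
    rw [pvWhileLeft, dif_neg h]
    rw [pv_mod3, not_not] at h
    omega

theorem pvWhileRight_eq (x : Int) :
    pvWhileRight x = if x % 3 = 0 then x else x + 3 - x % 3 := by
  induction x using pvWhileRight.induct with
  | case1 x h ih =>
    rw [pvWhileRight, dif_pos h, ih]
    rw [pv_mod3] at h
    split_ifs <;> omega
  | case2 x h =>
    rw [pvWhileRight, dif_neg h]
    rw [pv_mod3, not_not] at h
    simp [h]

theorem pv_step_one (num : Int) (h : PySem.Int.mod num 3 ≠ 0) :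
    min |pvWhileLeft (num - 1) - num| |pvWhileRight (num + 1) - num| = 1 := by
  rw [pv_mod3] at h
  have hl : (num - 1) % 3 = num % 3 - 1 := by omega
  have hr : (num + 1) % 3 = (num % 3 + 1) % 3 := by omega
  rw [pvWhileLeft_eq, pvWhileRight_eq, hl, hr]
  rcases (by omega : num % 3 = 1 ∨ num % 3 = 2) with h3 | h3 <;> rw [h3]
  · rw [if_neg (by decide : ¬ ((1:Int)+1)%3 = 0)]
    have a1 : |num - 1 - (1 - 1) - num| = 1 := by
      rw [show num - 1 - (1 - 1) - num = -1 by ring]; decide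
    have a2 : |num + 1 + 3 - ((1:Int)+1)%3 - num| = 2 := by
      rw [show num + 1 + 3 - ((1:Int)+1)%3 - num = 2 by omega]; decide
    rw [a1, a2]; decide
  · rw [if_pos (by decide : ((2:Int)+1)%3 = 0)]
    have a1 : |num - 1 - (2 - 1) - num| = 2 := by
      rw [show num - 1 - (2 - 1) - num = -2 by ring]; decide
    have a2 : |num + 1 - num| = 1 := by
      rw [show num + 1 - num = 1 by ring]; decide
    rw [a1, a2]; decide

theorem pv_fold_eq (l : List Int) (c : Int) :
    l.foldl (fun count num =>
      if PySem.Int.mod num 3 ≠ 0 then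
        let left_num := pvWhileLeft (num - 1)
        let right_num := pvWhileRight (num + 1)
        let left_diff := |left_num - num|
        let right_diff := |right_num - num|
        count + min left_diff right_diff
      else count) c
    = l.foldl (fun c num => if PySem.Int.mod num 3 ≠ 0 then c + 1 else c) c := by
  induction l generalizing c with
  | nil => rfl
  | cons x xs ih =>
    simp only [List.foldl_cons]
    by_cases h : PySem.Int.mod x 3 ≠ 0
    · rw [if_pos h, if_pos h]
      simp only [pv_step_one x h]
      exact ih _
    · rw [if_neg h, if_neg h]; exact ih _

-- ===== VERDICT (by name: the statement is the Claim_ definition above) =====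
theorem make_divisible_by_3_spec : Claim_equal_make_divisible_by_3 := by
  intro nums _
  unfold Spec_make_divisible_by_3 make_divisible_by_3 make_divisible_by_3_alt
  exact pv_fold_eq nums 0
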